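-- pv_equiv track=rewrite | github.com/aphoticshaman/HungryOrca | gatorca_phase5_dna_library.py | pad_uniform
-- ===== SOURCE A (Python) =====
-- from typing import List, Dict, Any, Tuple, Set
--
-- Grid = List[List[int]]
--
-- def pad_uniform(g: Grid, padding: int = 1) -> Grid:
--     """Add uniform padding around grid"""
--     if not g or not g[0]:
--         return g
--
--     h, w = len(g), len(g[0])
--     result = [[0]*(w + 2*padding) for _ in range(h + 2*padding)]
--
--     for y in range(h):
--         for x in range(w):
--             result[y+padding][x+padding] = g[y][x]
--
--     return result
-- ===== SOURCE B (Python) =====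
-- def pad_uniform(g, padding=1):
--     """Add uniform padding around grid (row-by-row assembly)."""
--     if not g or not g[0]:
--         return g
--     w = len(g[0])
--     pad = [0] * padding
--     top = [[0] * (w + 2 * padding) for _ in range(padding)]
--     middle = [pad + [row[x] for x in range(w)] + pad for row in g]
--     bottom = [[0] * (w + 2 * padding) for _ in range(padding)]
--     return top + middle + bottom
-- ===== Notes on version B (the rewrite author's own statement) =====
-- stated objective: simpler
-- what changed: B assembles the padded grid directly as top zero rows ++ [pad ++ trimmed row ++ pad] ++ bottom zero rows in one pass, instead of allocating a zeroed (h+2p)x(w+2p) grid and overwriting interior cells with a nested index loop.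
import Mathlib
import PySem

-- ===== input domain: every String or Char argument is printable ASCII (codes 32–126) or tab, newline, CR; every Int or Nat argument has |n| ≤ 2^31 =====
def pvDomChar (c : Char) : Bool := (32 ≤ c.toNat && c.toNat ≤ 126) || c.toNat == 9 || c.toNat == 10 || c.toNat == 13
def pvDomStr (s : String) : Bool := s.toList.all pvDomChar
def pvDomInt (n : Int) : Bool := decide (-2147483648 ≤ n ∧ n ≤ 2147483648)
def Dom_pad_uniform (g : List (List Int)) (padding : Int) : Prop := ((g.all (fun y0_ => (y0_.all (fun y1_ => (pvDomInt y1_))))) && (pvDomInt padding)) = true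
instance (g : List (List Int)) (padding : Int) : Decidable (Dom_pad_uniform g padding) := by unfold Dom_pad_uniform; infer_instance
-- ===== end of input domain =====

-- B assembles the padded grid row-by-row (top zero rows ++ padded rows ++ bottom zero rows)
-- instead of A's zeroed-allocation-plus-nested-overwrite loop; objective: simpler decomposition.

-- ===== PORT A =====
-- Literal port of A: allocate a zeroed (h+2p)×(w+2p) grid, then for y in range(h),
-- for x in range(w) set result[y+padding][x+padding] = g[y][x].  Indices use .toNat,
-- exact on Pre_ (padding ≥ 0); where Python raises (negative padding, short rows) Pre_ excludes.
def pad_uniform (g : List (List Int)) (padding : Int) : List (List Int) :=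
  if g = [] ∨ g.headD [] = [] then g
  else
    let h : Nat := g.length
    let w : Nat := (g.headD []).length
    let result : List (List Int) :=
      List.replicate ((h : Int) + 2 * padding).toNat
        (List.replicate ((w : Int) + 2 * padding).toNat 0)
    (List.range h).foldl (fun (res : List (List Int)) (y : Nat) =>
      (List.range w).foldl (fun (res2 : List (List Int)) (x : Nat) =>
        res2.modify (((y : Int) + padding).toNat)
          (fun row => row.set (((x : Int) + padding).toNat) ((g.getD y []).getD x 0))) res) result

-- ===== PORT B =====
-- Literal port of B: top zero rows ++ [pad ++ trimmed row ++ pad for row in g] ++ bottom zero rows.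
def pad_uniform_alt (g : List (List Int)) (padding : Int) : List (List Int) :=
  if g = [] ∨ g.headD [] = [] then g
  else
    let w : Nat := (g.headD []).length
    let pad : List Int := List.replicate padding.toNat 0
    let top : List (List Int) :=
      List.replicate padding.toNat (List.replicate ((w : Int) + 2 * padding).toNat 0)
    let middle : List (List Int) :=
      g.map (fun row => pad ++ (List.range w).map (fun x => row.getD x 0) ++ pad)
    let bottom : List (List Int) :=
      List.replicate padding.toNat (List.replicate ((w : Int) + 2 * padding).toNat 0)
    top ++ middle ++ bottom

-- ===== PRECONDITION & SPEC =====
-- Pre_ excludes exactly the inputs where A raises IndexError: a nonempty grid with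
-- negative padding, or a row shorter than the first row.
def Pre_pad_uniform (g : List (List Int)) (padding : Int) : Prop :=
  g = [] ∨ g.headD [] = [] ∨
    (0 ≤ padding ∧ ∀ row ∈ g, (g.headD []).length ≤ row.length)
instance (g : List (List Int)) (padding : Int) : Decidable (Pre_pad_uniform g padding) := by
  unfold Pre_pad_uniform; infer_instance

def pvWitness_pad_uniform : List (List Int) × Int := ([[1, 2], [3, 4]], 1)

def Spec_pad_uniform (g : List (List Int)) (padding : Int) (out : List (List Int)) : Prop :=
  out = pad_uniform_alt g padding
instance (g : List (List Int)) (padding : Int) (out : List (List Int)) :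
    Decidable (Spec_pad_uniform g padding out) := by unfold Spec_pad_uniform; infer_instance

-- ===== CLAIM (what is proved, stated in full; the proofs are below) =====
def Claim_equal_pad_uniform : Prop := ∀ (g : List (List Int)) (padding : Int),
  Dom_pad_uniform g padding → Pre_pad_uniform g padding →
  Spec_pad_uniform g padding (pad_uniform g padding)

-- ===== LEMMAS AND PROOFS =====

-- Fusing the inner loop: repeatedly modifying the same row index k equals one modify
-- with the folded row update.
theorem foldl_modify_fuse {α : Type} (n k : Nat) (step : Nat → α → α) (res : List α) :
    (List.range n).foldl (fun r x => r.modify k (step x)) res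
      = res.modify k (fun a => (List.range n).foldl (fun a x => step x a) a) := by
  induction n generalizing res with
  | zero =>
    simp [List.range_zero, List.foldl_nil]
    apply List.ext_getElem (by simp) (fun i h1 h2 => ?_)
    simp [List.getElem_modify]
  | succ n ih =>
    simp only [List.range_succ, List.foldl_append, List.foldl_cons, List.foldl_nil]
    rw [ih]
    apply List.ext_getElem (by simp) (fun i h1 h2 => ?_)
    simp only [List.getElem_modify]
    split <;> rfl

-- Characterisation of a fold that writes f y at position y + p, for y in range n.
theorem foldl_modify_range {α : Type} (p : Nat) (f : Nat → α → α) :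
    ∀ (n : Nat) (R : List α), p + n ≤ R.length →
    (List.range n).foldl (fun r y => r.modify (y + p) (f y)) R
      = R.mapIdx (fun i a => if p ≤ i ∧ i < p + n then f (i - p) a else a) := by
  intro n
  induction n with
  | zero =>
    intro R _
    simp only [List.range_zero, List.foldl_nil]
    apply List.ext_getElem (by simp) (fun i h1 h2 => ?_)
    rw [List.getElem_mapIdx, if_neg (by omega)]
  | succ n ih =>
    intro R hR
    rw [List.range_succ, List.foldl_append, ih R (by omega)]
    simp only [List.foldl_cons, List.foldl_nil]
    apply List.ext_getElem (by simp) (fun i h1 h2 => ?_)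
    have hiR : i < R.length := by simpa using h1
    simp only [List.getElem_modify, List.getElem_mapIdx]
    by_cases hi : n + p = i
    · subst hi
      rw [if_pos rfl, if_neg (by omega), if_pos (by omega)]
      congr 1
      omega
    · rw [if_neg hi]
      by_cases h1' : p ≤ i ∧ i < p + n
      · rw [if_pos h1', if_pos ⟨h1'.1, by omega⟩]
      · rw [if_neg h1', if_neg (by omega)]

-- Same characterisation for a fold of set (x + p) (v x).
theorem foldl_set_range {α : Type} (p : Nat) (v : Nat → α) :
    ∀ (n : Nat) (row : List α), p + n ≤ row.length →
    (List.range n).foldl (fun r x => r.set (x + p) (v x)) row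
      = row.mapIdx (fun j a => if p ≤ j ∧ j < p + n then v (j - p) else a) := by
  intro n
  induction n with
  | zero =>
    intro row _
    simp only [List.range_zero, List.foldl_nil]
    apply List.ext_getElem (by simp) (fun i h1 h2 => ?_)
    rw [List.getElem_mapIdx, if_neg (by omega)]
  | succ n ih =>
    intro row hR
    rw [List.range_succ, List.foldl_append, ih row (by omega)]
    simp only [List.foldl_cons, List.foldl_nil]
    apply List.ext_getElem (by simp) (fun i h1 h2 => ?_)
    have hiR : i < row.length := by simpa using h1
    simp only [List.getElem_set, List.getElem_mapIdx]
    by_cases hi : n + p = i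
    · subst hi
      rw [if_pos rfl, if_pos (by omega)]
      congr 1
      omega
    · rw [if_neg hi]
      by_cases h1' : p ≤ i ∧ i < p + n
      · rw [if_pos h1', if_pos ⟨h1'.1, by omega⟩]
      · rw [if_neg h1', if_neg (by omega)]

-- ===== VERDICT (by name: the statement is the Claim_ definition above) =====
theorem pad_uniform_spec : Claim_equal_pad_uniform := by
  intro g padding _ hpre
  unfold Spec_pad_uniform pad_uniform pad_uniform_alt
  by_cases hc : g = [] ∨ g.headD [] = []
  · rw [if_pos hc, if_pos hc]
  · rw [if_neg hc, if_neg hc]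
    dsimp only
    obtain ⟨hp, hrows⟩ : 0 ≤ padding ∧ ∀ row ∈ g, (g.headD []).length ≤ row.length := by
      rcases hpre with h | h | h
      · exact absurd (Or.inl h) hc
      · exact absurd (Or.inr h) hc
      · exact h
    set h := g.length with hh
    set w := (g.headD []).length with hw
    set p : Nat := padding.toNat with hpn
    have hH : ((h : Int) + 2 * padding).toNat = h + 2 * p := by omega
    have hW : ((w : Int) + 2 * padding).toNat = w + 2 * p := by omega
    -- rewrite A's loop indices from Int-toNat to Nat form, then apply the loop lemmas
    rw [hH, hW]
    have estep : (fun (res : List (List Int)) (y : Nat) =>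
        (List.range w).foldl (fun (res2 : List (List Int)) (x : Nat) =>
          res2.modify (((y : Int) + padding).toNat)
            (fun row => row.set (((x : Int) + padding).toNat) ((g.getD y []).getD x 0))) res)
        = (fun res y => res.modify (y + p)
            (fun row => (List.range w).foldl
              (fun r x => r.set (x + p) ((g.getD y []).getD x 0)) row)) := by
      funext res y
      rw [show (((y : Int) + padding).toNat) = y + p by omega]
      rw [foldl_modify_fuse]
      congr 1
      funext a
      apply List.foldl_ext
      intro b x _
      rw [show (((x : Int) + padding).toNat) = x + p by omega]
    rw [estep]
    rw [foldl_modify_range p _ h _ (by simp; omega)]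
    -- now both sides are concrete: compare elementwise
    apply List.ext_getElem (by simp [List.length_mapIdx]; omega) (fun i hi1 hi2 => ?_)
    have hi' : i < h + 2 * p := by simpa [List.length_mapIdx] using hi1
    rw [List.getElem_mapIdx, List.getElem_replicate, List.getElem_append]
    by_cases h2' : i < p + h
    · rw [dif_pos (by simp; omega), List.getElem_append]
      by_cases h1' : i < p
      · rw [dif_pos (by simpa using h1'), if_neg (by omega), List.getElem_replicate]
      · rw [dif_neg (by simpa using h1'), if_pos (by omega)]
        have hyr : i - p < g.length := by omega
        rw [List.getElem_map]
        simp only [List.length_replicate]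
        have hrowD : g.getD (i - p) [] = g[i - p]'hyr := by
          rw [List.getD_eq_getElem?_getD, List.getElem?_eq_getElem hyr]
          rfl
        rw [foldl_set_range p _ w _ (by simp; omega)]
        have hwle : w ≤ (g[i - p]'hyr).length := hrows _ (List.getElem_mem _)
        apply List.ext_getElem (by simp [List.length_mapIdx]; omega) (fun j hj1 hj2 => ?_)
        have hj' : j < w + 2 * p := by simpa [List.length_mapIdx] using hj1
        rw [List.getElem_mapIdx, List.getElem_replicate, List.getElem_append]
        by_cases hjw : j < p + w
        · rw [dif_pos (by simp; omega), List.getElem_append]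
          by_cases hjp : j < p
          · rw [dif_pos (by simpa using hjp), if_neg (by omega), List.getElem_replicate]
          · rw [dif_neg (by simpa using hjp), if_pos (by omega), List.getElem_map, List.getElem_range]
            simp only [List.length_replicate]
            rw [hrowD]
        · rw [dif_neg (by simp; omega), if_neg (by omega), List.getElem_replicate]
    · rw [dif_neg (by simp; omega), if_neg (by omega), List.getElem_replicate]
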